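-- pv_equiv track=rewrite | github.com/skv-analyst/education | leetcode/10-two-pointers.py | solution_2108
-- ===== SOURCE A (Python) =====
-- def solution_2108(words):
--     # Time: O(n)
--     # Space: O(1)
--     def is_palindrome(word):
--         l, r = 0, len(word) - 1
--         while l < r:
--             if word[l] != word[r]:
--                 return False
--             else:
--                 l += 1
--                 r -= 1
--         return True
--
--     for word in words:
--         if is_palindrome(word):
--             return word
--
--     return ""
-- ===== SOURCE B (Python) =====
-- def solution_2108(words):
--     return next((w for w in words if w == w[::-1]), "")
-- ===== Notes on version B (the rewrite author's own statement) =====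
-- stated objective: idiomatic
-- what changed: Replaces the inward two-pointer index loop per word and the explicit for-loop with a one-line generator expression that finds the first word equal to its full slice reversal w[::-1].
import Mathlib
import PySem

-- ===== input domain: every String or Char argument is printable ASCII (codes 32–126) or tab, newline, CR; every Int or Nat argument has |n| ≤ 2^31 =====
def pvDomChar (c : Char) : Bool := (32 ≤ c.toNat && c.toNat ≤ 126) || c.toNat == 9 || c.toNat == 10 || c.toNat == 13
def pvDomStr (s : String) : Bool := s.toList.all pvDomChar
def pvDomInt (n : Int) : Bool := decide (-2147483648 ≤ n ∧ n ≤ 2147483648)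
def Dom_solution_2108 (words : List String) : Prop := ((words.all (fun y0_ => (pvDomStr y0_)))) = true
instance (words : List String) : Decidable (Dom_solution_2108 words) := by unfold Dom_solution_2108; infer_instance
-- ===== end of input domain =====

-- B replaces A's per-word inward two-pointer scan and explicit search loop by the idiomatic
-- first-match over `w == w[::-1]` (reverse the whole word and compare); same cost, no speed claim.

-- ===== PORT A =====
-- is_palindrome's while-loop: l, r walk inward; word[l]/word[r] via pyGet? (always in range since 0 ≤ l < r < len)
def palAux (cs : List Char) (l r : Int) : Bool :=
  if l < r then
    if PySem.List.pyGet? cs l ≠ PySem.List.pyGet? cs r then false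
    else palAux cs (l + 1) (r - 1)
  else true
termination_by (r - l).toNat
decreasing_by omega

def solution_2108 (words : List String) : String :=
  match words with
  | [] => ""
  | w :: ws => if palAux w.toList 0 (PySem.Str.len w - 1) then w else solution_2108 ws

-- ===== PORT B =====
-- next((w for w in words if w == w[::-1]), "")
def solution_2108_alt (words : List String) : String :=
  (words.find? (fun w => some w == PySem.Str.slice? w none none (-1))).getD ""

-- ===== PRECONDITION & SPEC =====
def Spec_solution_2108 (words : List String) (out : String) : Prop := out = solution_2108_alt words
instance (words : List String) (out : String) : Decidable (Spec_solution_2108 words out) := by unfold Spec_solution_2108; infer_instance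

-- ===== CLAIM (what is proved, stated in full; the proofs are below) =====
def Claim_equal_solution_2108 : Prop := ∀ (words : List String), Dom_solution_2108 words → Spec_solution_2108 words (solution_2108 words)

-- ===== LEMMAS AND PROOFS =====

-- the two-pointer loop checks every mirrored pair inside [l, r]
theorem palAux_iff (cs : List Char) (l r : Int) (h0 : 0 ≤ l) (hr : r < cs.length) :
    palAux cs l r = true ↔
      ∀ i j : Nat, l ≤ i → l ≤ j → i ≤ r → j ≤ r → (i : Int) + j = l + r →
        cs.getD i ' ' = cs.getD j ' ' := by
  have H : ∀ n (l r : Int), (r - l).toNat = n → 0 ≤ l → r < cs.length →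
      (palAux cs l r = true ↔
        ∀ i j : Nat, l ≤ i → l ≤ j → i ≤ r → j ≤ r → (i : Int) + j = l + r →
          cs.getD i ' ' = cs.getD j ' ') := by
    intro n
    induction n using Nat.strong_induction_on with
    | _ n ih =>
      intro l r hn h0 hr
      rw [palAux]
      by_cases hlr : l < r
      · have hl' : l.toNat < cs.length := by omega
        have hr' : r.toNat < cs.length := by omega
        have hgl : PySem.List.pyGet? cs l = some cs[l.toNat] :=
          PySem.List.pyGet?_eq_some_getElem cs h0 (by omega)
        have hgr : PySem.List.pyGet? cs r = some cs[r.toNat] :=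
          PySem.List.pyGet?_eq_some_getElem cs (by omega) hr
        simp only [if_pos hlr]
        by_cases hne : PySem.List.pyGet? cs l ≠ PySem.List.pyGet? cs r
        · simp only [if_pos hne]
          constructor
          · intro hfalse; exact absurd hfalse (by simp)
          · intro P
            exfalso; apply hne
            have := P l.toNat r.toNat (by omega) (by omega) (by omega) (by omega) (by omega)
            rw [List.getD_eq_getElem _ _ hl', List.getD_eq_getElem _ _ hr'] at this
            rw [hgl, hgr, this]
        · simp only [if_neg hne]
          simp only [ne_eq, not_not] at hne
          rw [hgl, hgr] at hne
          have hchar : cs[l.toNat] = cs[r.toNat] := by injection hne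
          rw [ih ((r - 1) - (l + 1)).toNat (by omega) (l + 1) (r - 1) rfl (by omega) (by omega)]
          constructor
          · intro P i j c1 c2 c3 c4 c5
            by_cases hi : (i : Int) = l
            · have hi' : i = l.toNat := by omega
              have hj' : j = r.toNat := by omega
              subst hi' hj'
              rw [List.getD_eq_getElem _ _ hl', List.getD_eq_getElem _ _ hr']
              exact hchar
            · by_cases hi2 : (i : Int) = r
              · have hi' : i = r.toNat := by omega
                have hj' : j = l.toNat := by omega
                subst hi' hj'
                rw [List.getD_eq_getElem _ _ hl', List.getD_eq_getElem _ _ hr']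
                exact hchar.symm
              · exact P i j (by omega) (by omega) (by omega) (by omega) (by omega)
          · intro P i j c1 c2 c3 c4 c5
            exact P i j (by omega) (by omega) (by omega) (by omega) (by omega)
      · simp only [if_neg hlr]
        constructor
        · intro _ i j c1 c2 c3 c4 c5
          have : i = j := by omega
          rw [this]
        · intro _; trivial
  exact H (r - l).toNat l r rfl h0 hr

theorem palAux_eq_reverse (cs : List Char) :
    palAux cs 0 ((cs.length : Int) - 1) = true ↔ cs = cs.reverse := by
  by_cases hnil : cs = []
  · subst hnil; simp [palAux]
  · have hlen : 1 ≤ cs.length := by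
      cases cs with
      | nil => exact absurd rfl hnil
      | cons a t => simp
    rw [palAux_iff cs 0 ((cs.length : Int) - 1) (by omega) (by omega)]
    constructor
    · intro P
      apply List.ext_getElem (by simp)
      intro k h1 h2
      rw [List.getElem_reverse]
      have := P k (cs.length - 1 - k) (by omega) (by omega) (by omega) (by omega) (by omega)
      rwa [List.getD_eq_getElem _ _ (by omega), List.getD_eq_getElem _ _ (by omega)] at this
    · intro h i j c1 c2 c3 c4 c5
      have hi : i < cs.length := by omega
      have hj : j < cs.length := by omega
      have h2 : cs.getD i ' ' = cs.reverse.getD i ' ' := by rw [← h]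
      rw [h2, List.getD_eq_getElem _ _ (show i < cs.reverse.length by simpa using hi),
        List.getD_eq_getElem _ _ hj, List.getElem_reverse]
      simp only [show cs.length - 1 - i = j from by omega]

theorem pred_eq (w : String) :
    palAux w.toList 0 (PySem.Str.len w - 1) =
      (some w == PySem.Str.slice? w none none (-1)) := by
  rw [PySem.Str.slice?_none_none_neg_one]
  have h := palAux_eq_reverse w.toList
  simp only [PySem.Str.len]
  by_cases hp : w.toList = w.toList.reverse
  · rw [h.mpr hp]
    have hw : String.ofList w.toList.reverse = w := by rw [← hp]; simp
    simp [hw]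
  · have hf : palAux w.toList 0 ((w.toList.length : Int) - 1) = false := by
      cases hb : palAux w.toList 0 ((w.toList.length : Int) - 1) with
      | false => rfl
      | true => exact absurd (h.mp hb) hp
    rw [hf]
    symm
    rw [beq_eq_false_iff_ne]
    intro h'
    apply hp
    have : w.toList = (String.ofList w.toList.reverse).toList := by
      rw [← Option.some_inj.mp h']
    simpa using this

theorem solution_2108_spec' (words : List String) :
    solution_2108 words = solution_2108_alt words := by
  induction words with
  | nil => rfl
  | cons w ws ih =>
    simp only [solution_2108, solution_2108_alt, List.find?_cons, pred_eq w]
    cases h : (some w == PySem.Str.slice? w none none (-1)) <;>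
      simp [ih, solution_2108_alt]

-- ===== VERDICT (by name: the statement is the Claim_ definition above) =====
theorem solution_2108_spec : Claim_equal_solution_2108 := by
  intro words _
  exact solution_2108_spec' words
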